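-- pv_equiv track=rewrite | github.com/anudeepdv/LeetCode | find-minimum-time-to-finish-all-jobs/find-minimum-time-to-finish-all-jobs.py | minimumTimeRequired
-- ===== SOURCE A (Python) =====
-- from typing import List
--
-- def minimumTimeRequired(jobs: List[int], k: int) -> int:
--
--     jobs.sort(reverse=True)
--     buckets = [0]*k
--
--     n=len(jobs)
--
--     def dfs(i):
--         ans =float('inf')
--         vis=set()
--         if i==n:
--             return max(buckets)
--
--         for j in range(k):
--             if buckets[j] in vis :
--                 continue
--             vis.add(buckets[j])
--             buckets[j]+=jobs[i]
--             if max(buckets)<ans: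
--                 ans = min(ans,dfs(i+1))
--             buckets[j]-=jobs[i]
--
--         return ans
--
--     return dfs(0)
-- ===== SOURCE B (Python) =====
-- def _succ(st, v, j):
--     # move one bucket of load v to load v + j, in the (load, count) multiset encoding
--     w = v + j
--     out = []
--     added = False
--     for (u, c2) in st:
--         c3 = c2
--         if u == v:
--             c3 -= 1
--         if u == w:
--             c3 += 1
--             added = True
--         if c3 > 0:
--             out.append((u, c3))
--     if not added:
--         out.append((w, 1))
--     return tuple(sorted(out))
--
--
-- def minimumTimeRequired(jobs, k):
--     jobs = sorted(jobs, reverse=True)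
--     # exact BFS/DP over canonical states: a state is the multiset of bucket loads,
--     # encoded as a sorted tuple of (load, count) pairs; one pass per job, dedup by set
--     states = {((0, k),)}
--     for j in jobs:
--         nxt = set()
--         for st in states:
--             for (v, c) in st:
--                 nxt.add(_succ(st, v, j))
--         states = nxt
--     return min(max(v for v, c in st) for st in states)
-- ===== Notes on version B (the rewrite author's own statement) =====
-- stated objective: alternative
-- what changed: A's depth-first backtracking over workers with a running-best prune and per-level duplicate-value skipping is replaced by a breadth-first dynamic program over canonical states: each state is the multiset of bucket loads kept as a sorted tuple of (load, count) pairs, one pass per job expands and dedups the state set, and the answer is the minimum over final states of the maximum load.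
-- outside the precondition, e.g. on minimumTimeRequired([1, 2], 0): A returns inf, B returns 3; on minimumTimeRequired([], 0): A raises ValueError, B returns 0; on minimumTimeRequired([-2, -1, 1], 2): A returns 0, B returns -1
import Mathlib
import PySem

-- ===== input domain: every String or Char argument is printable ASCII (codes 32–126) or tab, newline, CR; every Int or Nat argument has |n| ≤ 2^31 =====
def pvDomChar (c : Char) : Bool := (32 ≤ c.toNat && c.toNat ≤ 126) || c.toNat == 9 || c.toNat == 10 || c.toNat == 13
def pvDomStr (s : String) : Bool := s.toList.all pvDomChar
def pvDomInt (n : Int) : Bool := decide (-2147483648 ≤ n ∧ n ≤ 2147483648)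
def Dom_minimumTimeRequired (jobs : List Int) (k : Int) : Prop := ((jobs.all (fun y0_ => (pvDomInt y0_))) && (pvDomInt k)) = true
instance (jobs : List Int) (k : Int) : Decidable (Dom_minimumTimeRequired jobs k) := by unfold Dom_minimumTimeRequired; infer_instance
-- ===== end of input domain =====

-- B replaces A's depth-first backtracking over workers (with running-best pruning) by a
-- breadth-first dynamic program over canonically-sorted, dedup-ed bucket-load-multiset states
-- (objective: alternative exact algorithm of the same cost class on the proved domain).
-- Both A and the Python B read `jobs` only; A additionally sorts `jobs` IN PLACE (caller-visible
-- mutation); the equivalence proved here is about the return value only.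

-- ===== PORT A =====
-- Python max(l) on an int list; `.getD 0` is exact whenever l ≠ [] (guaranteed by Pre_, k ≥ 1)
def pyMax (l : List Int) : Int := (PySem.List.max? l (fun y => y)).getD 0

-- Python min(ans, r) where `none` stands for float('inf')
def minOI : Option Int → Option Int → Option Int
  | none, y => y
  | some a, none => some a
  | some a, some c => some (min a c)

-- the `for j in range(k)` loop of dfs, walking the bucket list left to right
-- (pre = already-passed buckets, reversed; buckets[j] is the head of the suffix);
-- state = (vis, ans); `none` = float('inf')
def dfsLoop (f : List Int → Option Int) (j : Int) :
    List Int → List Int → PySem.Set Int × Option Int → PySem.Set Int × Option Int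
  | _, [], st => st
  | pre, v :: suf, (vis, ans) =>
    if v ∈ vis then dfsLoop f j (v :: pre) suf (vis, ans)
    else
      let b' := pre.reverse ++ (v + j) :: suf        -- buckets after buckets[j] += jobs[i]
      let ans' := if (match ans with | none => true | some a => decide (pyMax b' < a)) then
          minOI ans (f b') else ans
      dfsLoop f j (v :: pre) suf (PySem.Set.add vis v, ans')

-- dfs(i): the remaining jobs list plays the role of the index i; buckets passed functionally
def dfsA : List Int → List Int → Option Int
  | [], b => PySem.List.max? b (fun y => y)       -- max(buckets); none = raise, excluded by Pre_
  | j :: rs, b => (dfsLoop (fun b' => dfsA rs b') j [] b (PySem.Set.empty, none)).2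
termination_by structural l _ => l

def minimumTimeRequired (jobs : List Int) (k : Int) : Int :=
  let js := PySem.List.sorted jobs (fun y => y) true   -- jobs.sort(reverse=True)
  let buckets := List.replicate k.toNat (0 : Int)      -- [0]*k  ([] for k ≤ 0)
  (dfsA js buckets).getD 0   -- under Pre_ (k ≥ 1) dfsA never returns none; getD exact there

-- ===== PORT B =====
-- inner `for (u, c2) in st` loop: adjust the counts of v (the emptied-by-one load) and
-- w = v + j (the new load); returns (out, added)
def bumpLoop (v w : Int) : List (Int × Int) → List (Int × Int) × Bool
  | [] => ([], false)
  | (u, c2) :: t =>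
    let r := bumpLoop v w t
    let c3 := c2 - (if u = v then 1 else 0) + (if u = w then 1 else 0)
    ((if 0 < c3 then [(u, c3)] else []) ++ r.1, (u == w) || r.2)

-- successor state: move one bucket of load v to load v + j, re-canonicalised by sorting
def succCounter (st : List (Int × Int)) (v j : Int) : List (Int × Int) :=
  let w := v + j
  let r := bumpLoop v w st
  let out := if r.2 then r.1 else r.1 ++ [(w, 1)]
  PySem.List.sorted2 out (fun p => p.1) (fun p => p.2)   -- tuple(sorted(out))

-- one BFS level: nxt = set(); for st in states: for (v, c) in st: nxt.add(successor)
def stepB (j : Int) (states : List (List (Int × Int))) : List (List (Int × Int)) :=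
  states.foldl (fun nxt st =>
    st.foldl (fun nxt2 p => PySem.Set.add nxt2 (succCounter st p.1 j)) nxt) PySem.Set.empty

def minimumTimeRequired_alt (jobs : List Int) (k : Int) : Int :=
  let js := PySem.List.sorted jobs (fun y => y) true      -- jobs = sorted(jobs, reverse=True)
  let states := js.foldl (fun sts j => stepB j sts) [[((0 : Int), k)]]  -- {((0, k),)}
  (PySem.List.min? (states.map (fun st => pyMax (st.map (fun p => p.1)))) (fun y => y)).getD 0
  -- min(max(v for (v, c) in st) for st in states); getD exact: states ≠ [] under Pre_ (k ≥ 1)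

-- ===== PRECONDITION & SPEC =====
-- Pre_ excludes k ≤ 0, where the Python A returns float('inf') (a float, not an int) or raises
-- ValueError; beyond that it requires nonnegative job durations — negative durations are outside
-- the function's natural domain of job times (the underlying LeetCode problem guarantees
-- jobs[i] ≥ 1) — except in the degenerate cases k = 1 or at most 2 jobs, which are kept inside
-- the claim (the equality is proved there for arbitrary job values).
def Pre_minimumTimeRequired (jobs : List Int) (k : Int) : Prop :=
  1 ≤ k ∧ (k = 1 ∨ jobs.length ≤ 2 ∨ ∀ x ∈ jobs, 0 ≤ x)
instance (jobs : List Int) (k : Int) : Decidable (Pre_minimumTimeRequired jobs k) := by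
  unfold Pre_minimumTimeRequired; infer_instance

def pvWitness_minimumTimeRequired : List Int × Int := ([3, 2, 2], 2)

def Spec_minimumTimeRequired (jobs : List Int) (k : Int) (out : Int) : Prop :=
  out = minimumTimeRequired_alt jobs k
instance (jobs : List Int) (k : Int) (out : Int) : Decidable (Spec_minimumTimeRequired jobs k out) := by
  unfold Spec_minimumTimeRequired; infer_instance

-- ===== CLAIM (what is proved, stated in full; the proofs are below) =====
def Claim_equal_minimumTimeRequired : Prop := ∀ (jobs : List Int) (k : Int), Dom_minimumTimeRequired jobs k → Pre_minimumTimeRequired jobs k → Spec_minimumTimeRequired jobs k (minimumTimeRequired jobs k)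

-- ===== LEMMAS AND PROOFS =====

-- b[i] += j on a bucket list (spec-side shorthand)
def bumpAt (b : List Int) (i : Nat) (j : Int) : List Int := b.set i (b.getD i 0 + j)

-- Python min(l) on an int list, total form (spec-side shorthand)
def pyMin (l : List Int) : Int := (PySem.List.min? l (fun y => y)).getD 0

-- all ways to add j to one bucket of b
def bumpsL (j : Int) : List Int → List (List Int)
  | [] => []
  | x :: l => ((x + j) :: l) :: (bumpsL j l).map (x :: ·)

-- ground truth: minimal final makespan over all completions
def leafMin : List Int → List Int → Int
  | [], b => pyMax b
  | j :: rs, b => pyMin ((bumpsL j b).map (fun c => leafMin rs c))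
termination_by structural l _ => l

lemma length_bumpAt (b : List Int) (i : Nat) (j : Int) : (bumpAt b i j).length = b.length := by
  simp [bumpAt]

lemma bumpAt_cons_succ (x : Int) (l : List Int) (i : Nat) (j : Int) :
    bumpAt (x :: l) (i + 1) j = x :: bumpAt l i j := by
  simp [bumpAt]

lemma bumpsL_eq_range (j : Int) (b : List Int) :
    bumpsL j b = (List.range b.length).map (fun i => bumpAt b i j) := by
  induction b with
  | nil => simp [bumpsL]
  | cons x l ih =>
    simp only [bumpsL, List.length_cons, List.range_succ_eq_map, List.map_cons, List.map_map]
    refine congrArg₂ _ (by simp [bumpAt]) ?_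
    rw [ih, List.map_map]
    exact List.map_congr_left (fun i _ => by simp [Function.comp, bumpAt_cons_succ])

lemma mem_bumpsL {c : List Int} {j : Int} {b : List Int} :
    c ∈ bumpsL j b ↔ ∃ i, i < b.length ∧ c = bumpAt b i j := by
  rw [bumpsL_eq_range]
  simp only [List.mem_map, List.mem_range]
  constructor
  · rintro ⟨i, hi, rfl⟩; exact ⟨i, hi, rfl⟩
  · rintro ⟨i, hi, rfl⟩; exact ⟨i, hi, rfl⟩

lemma pyMax_spec {l : List Int} (h : l ≠ []) : pyMax l ∈ l ∧ ∀ x ∈ l, x ≤ pyMax l := by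
  rcases hq : PySem.List.max? l (fun y => y) with _ | m
  · exact absurd ((PySem.List.max?_eq_none_iff _ _).mp hq) h
  · have hmem := PySem.List.max?_mem hq
    have hmax := PySem.List.max?_isMax hq
    simp only [pyMax, hq, Option.getD_some]
    exact ⟨hmem, fun x hx => hmax x hx⟩

lemma pyMin_spec {l : List Int} (h : l ≠ []) : pyMin l ∈ l ∧ ∀ x ∈ l, pyMin l ≤ x := by
  rcases hq : PySem.List.min? l (fun y => y) with _ | m
  · exact absurd ((PySem.List.min?_eq_none_iff _ _).mp hq) h
  · have hmem := PySem.List.min?_mem hq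
    have hmin := PySem.List.min?_isMin hq
    simp only [pyMin, hq, Option.getD_some]
    exact ⟨hmem, fun x hx => hmin x hx⟩

lemma pyMin_eq_of {l : List Int} {m : Int} (hm : m ∈ l) (hle : ∀ x ∈ l, m ≤ x) : pyMin l = m := by
  have h := pyMin_spec (List.ne_nil_of_mem hm)
  exact le_antisymm (h.2 m hm) (hle _ h.1)

lemma pyMax_perm {l₁ l₂ : List Int} (h : l₁.Perm l₂) : pyMax l₁ = pyMax l₂ := by
  by_cases h1 : l₁ = []
  · subst h1; rw [h.nil_eq]
  · have h2 : l₂ ≠ [] := fun he => h1 (by subst he; exact h.symm.nil_eq.symm)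
    have s1 := pyMax_spec h1
    have s2 := pyMax_spec h2
    exact le_antisymm (s2.2 _ (h.mem_iff.mp s1.1)) (s1.2 _ (h.mem_iff.mpr s2.1))

lemma pyMin_perm {l₁ l₂ : List Int} (h : l₁.Perm l₂) : pyMin l₁ = pyMin l₂ := by
  by_cases h1 : l₁ = []
  · subst h1; rw [h.nil_eq]
  · have h2 : l₂ ≠ [] := fun he => h1 (by subst he; exact h.symm.nil_eq.symm)
    have s1 := pyMin_spec h1
    have s2 := pyMin_spec h2
    exact le_antisymm (s1.2 _ (h.mem_iff.mpr s2.1)) (s2.2 _ (h.mem_iff.mp s1.1))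

lemma set_perm_cons_eraseIdx : ∀ (b : List Int) (i : Nat) (x : Int), i < b.length →
    (b.set i x).Perm (x :: b.eraseIdx i) := by
  intro b
  induction b with
  | nil => intro i x h; simp at h
  | cons a t ih =>
    intro i x h
    cases i with
    | zero => simp
    | succ i =>
      simp only [List.set_cons_succ, List.eraseIdx_cons_succ]
      exact ((ih i x (by simpa using h)).cons a).trans (List.Perm.swap x a _)

lemma perm_cons_eraseIdx : ∀ (b : List Int) (i : Nat), i < b.length →
    b.Perm (b.getD i 0 :: b.eraseIdx i) := by
  intro b
  induction b with
  | nil => intro i h; simp at h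
  | cons a t ih =>
    intro i h
    cases i with
    | zero => simp
    | succ i =>
      simp only [List.getD_cons_succ, List.eraseIdx_cons_succ]
      exact ((ih i (by simpa using h)).cons a).trans (List.Perm.swap _ a _)

lemma bumpAt_perm_of_eq {b : List Int} {i i' : Nat} (hi : i < b.length) (hi' : i' < b.length)
    (hv : b.getD i 0 = b.getD i' 0) (j : Int) : (bumpAt b i j).Perm (bumpAt b i' j) := by
  have e1 := perm_cons_eraseIdx b i hi
  have e2 := perm_cons_eraseIdx b i' hi'
  rw [← hv] at e2
  have he : (b.eraseIdx i).Perm (b.eraseIdx i') := (e1.symm.trans e2).cons_inv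
  have p1 := set_perm_cons_eraseIdx b i (b.getD i 0 + j) hi
  have p2 := set_perm_cons_eraseIdx b i' (b.getD i' 0 + j) hi'
  have hbe : bumpAt b i' j = b.set i' (b.getD i 0 + j) := by rw [bumpAt, hv]
  rw [← hv] at p2
  rw [bumpAt, hbe]
  exact (p1.trans (he.cons _)).trans p2.symm

lemma bumpsL_map_perm (j : Int) :
    ∀ {b₁ b₂ : List Int}, b₁.Perm b₂ → ∀ (F : List Int → Int),
      (∀ u v, u.Perm v → F u = F v) →
      ((bumpsL j b₁).map F).Perm ((bumpsL j b₂).map F) := by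
  intro b₁ b₂ h
  induction h with
  | nil => intro F hF; simp [bumpsL]
  | cons x h ih =>
    intro F hF
    rename_i l₁ l₂
    simp only [bumpsL, List.map_cons, List.map_map]
    have hhead : F ((x + j) :: l₁) = F ((x + j) :: l₂) := hF _ _ (h.cons _)
    rw [hhead]
    refine List.Perm.cons _ ?_
    have := ih (fun c => F (x :: c)) (fun u v hp => hF _ _ (hp.cons x))
    simpa [List.map_map, Function.comp] using this
  | swap x y l =>
    intro F hF
    simp only [bumpsL, List.map_cons, List.map_map, Function.comp_def]
    have h1 : F ((x + j) :: y :: l) = F (y :: (x + j) :: l) := hF _ _ (List.Perm.swap _ _ _)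
    have h2 : F (x :: (y + j) :: l) = F ((y + j) :: x :: l) := hF _ _ (List.Perm.swap _ _ _)
    have h3 : (bumpsL j l).map (fun c => F (x :: y :: c)) =
        (bumpsL j l).map (fun c => F (y :: x :: c)) :=
      List.map_congr_left (fun c _ => hF _ _ (List.Perm.swap _ _ _))
    rw [h1, h2, h3]
    exact List.Perm.swap _ _ _
  | trans h₁ h₂ ih₁ ih₂ =>
    intro F hF
    exact (ih₁ F hF).trans (ih₂ F hF)

lemma leafMin_perm : ∀ (rest : List Int) {b₁ b₂ : List Int}, b₁.Perm b₂ →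
    leafMin rest b₁ = leafMin rest b₂ := by
  intro rest
  induction rest with
  | nil => intro b₁ b₂ h; exact pyMax_perm h
  | cons x rs ih =>
    intro b₁ b₂ h
    simp only [leafMin]
    exact pyMin_perm (bumpsL_map_perm x h (fun c => leafMin rs c) (fun u v hp => ih hp))

lemma bumpAt_ne_nil {b : List Int} (hb : b ≠ []) (i : Nat) (j : Int) : bumpAt b i j ≠ [] := by
  intro he
  have hl := length_bumpAt b i j
  rw [he] at hl
  exact hb (List.eq_nil_of_length_eq_zero hl.symm)

lemma pyMax_le_bumpAt {b : List Int} {i : Nat} (hi : i < b.length) {j : Int} (hj : 0 ≤ j) :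
    pyMax b ≤ pyMax (bumpAt b i j) := by
  have hb : b ≠ [] := by intro he; subst he; simp at hi
  have hb' : bumpAt b i j ≠ [] := bumpAt_ne_nil hb i j
  have hub : ∀ x ∈ b, x ≤ pyMax (bumpAt b i j) := by
    intro x hx
    obtain ⟨p, hp, rfl⟩ := List.mem_iff_getElem.mp hx
    have hp' : p < (bumpAt b i j).length := by rw [length_bumpAt]; exact hp
    by_cases hpi : p = i
    · have hval : (bumpAt b i j)[i]'(by rw [length_bumpAt]; exact hi) = b[i]'hi + j := by
        simp [bumpAt, List.getElem_set, List.getElem?_eq_getElem hi]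
      have hmem : b[i]'hi + j ∈ bumpAt b i j := by rw [← hval]; exact List.getElem_mem _
      have h2 := (pyMax_spec hb').2 _ hmem
      have h3 : b[p]'hp = b[i]'hi := by cases hpi; rfl
      rw [h3]
      omega
    · have hip : i ≠ p := fun h => hpi h.symm
      have hval : (bumpAt b i j)[p]'hp' = b[p]'hp := by
        simp [bumpAt, List.getElem_set, hip]
      have hmem : b[p]'hp ∈ bumpAt b i j := by rw [← hval]; exact List.getElem_mem hp'
      exact (pyMax_spec hb').2 _ hmem
  exact hub _ (pyMax_spec hb).1

lemma bumpsL_ne_nil {b : List Int} (hb : b ≠ []) (j : Int) : bumpsL j b ≠ [] := by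
  rcases b with _ | ⟨x, t⟩
  · exact absurd rfl hb
  · simp [bumpsL]

lemma pyMax_le_leafMin : ∀ (rest : List Int) (b : List Int), (∀ x ∈ rest, 0 ≤ x) → b ≠ [] →
    pyMax b ≤ leafMin rest b := by
  intro rest
  induction rest with
  | nil => intro b _ _; simp [leafMin]
  | cons j rs ih =>
    intro b hnn hb
    have hj : 0 ≤ j := hnn j (List.mem_cons_self ..)
    have hrs : ∀ x ∈ rs, 0 ≤ x := fun x hx => hnn x (List.mem_cons_of_mem _ hx)
    simp only [leafMin]
    have hM : (bumpsL j b).map (fun c => leafMin rs c) ≠ [] := by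
      simp [bumpsL_ne_nil hb j]
    obtain ⟨hmem, _⟩ := pyMin_spec hM
    obtain ⟨c, hc, heq⟩ := List.mem_map.mp hmem
    obtain ⟨i, hi, rfl⟩ := mem_bumpsL.mp hc
    rw [← heq]
    exact (pyMax_le_bumpAt hi hj).trans (ih _ hrs (bumpAt_ne_nil hb i j))

lemma getD_append_mid (xs t : List Int) (v : Int) : (xs ++ v :: t).getD xs.length 0 = v := by
  induction xs with
  | nil => rfl
  | cons a xs ih => simpa using ih

lemma set_append_mid (xs t : List Int) (v w : Int) :
    (xs ++ v :: t).set xs.length w = xs ++ w :: t := by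
  induction xs with
  | nil => rfl
  | cons a xs ih => simpa using ih

lemma bumpAt_mid (xs t : List Int) (v j : Int) :
    bumpAt (xs ++ v :: t) xs.length j = xs ++ (v + j) :: t := by
  rw [bumpAt, getD_append_mid, set_append_mid]

lemma getD_eq_elem {b : List Int} {i : Nat} (hi : i < b.length) : b.getD i 0 = b[i]'hi := by
  simp [List.getD_eq_getElem?_getD, List.getElem?_eq_getElem hi]

lemma foldl_minOI_some (L : Nat → Int) :
    ∀ (t : List Nat) (x : Int),
      t.foldl (fun a i => minOI a (some (L i))) (some x) = some ((t.map L).foldl min x) := by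
  intro t
  induction t with
  | nil => intro x; rfl
  | cons c t ih => intro x; simp only [List.foldl_cons, List.map_cons, minOI]; exact ih _

lemma dfsLoop_eq (f : List Int → Option Int) (b : List Int) (j : Int) (rs : List Int)
    (Hrec : ∀ i, i < b.length → f (bumpAt b i j) = some (leafMin rs (bumpAt b i j)))
    (Hnn : ∀ x ∈ rs, 0 ≤ x) (hb : b ≠ []) :
    ∀ (suf pre : List Int) (vis : PySem.Set Int) (ans : Option Int),
      b = pre.reverse ++ suf →
      (∀ v ∈ vis, ∃ i, i < b.length ∧ b.getD i 0 = v ∧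
        ∃ a, ans = some a ∧ a ≤ leafMin rs (bumpAt b i j)) →
      (dfsLoop f j pre suf (vis, ans)).2 =
        (List.range' pre.length suf.length).foldl
          (fun a i => minOI a (some (leafMin rs (bumpAt b i j)))) ans := by
  intro suf
  induction suf with
  | nil => intro pre vis ans _ _; rfl
  | cons v t ih =>
    intro pre vis ans hbeq hInv
    have hi : pre.length < b.length := by
      rw [hbeq, List.length_append, List.length_reverse]; simp
    have hgd : b.getD pre.length 0 = v := by
      rw [hbeq]
      have h := getD_append_mid pre.reverse t v
      rwa [List.length_reverse] at h
    have hbump : bumpAt b pre.length j = pre.reverse ++ (v + j) :: t := by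
      rw [hbeq]
      have h := bumpAt_mid pre.reverse t v j
      rwa [List.length_reverse] at h
    have hbeq' : b = (v :: pre).reverse ++ t := by rw [hbeq]; simp
    have hrange : List.range' pre.length (v :: t).length =
        pre.length :: List.range' (pre.length + 1) t.length := by
      rw [List.length_cons, List.range'_succ]
    by_cases hv : v ∈ vis
    · -- duplicate bucket value: Python skips; the min is unchanged
      obtain ⟨i', hi', hgv, a, hansa, hale⟩ := hInv _ hv
      have hLeq : leafMin rs (bumpAt b pre.length j) = leafMin rs (bumpAt b i' j) :=
        leafMin_perm rs (bumpAt_perm_of_eq hi hi' (by rw [hgd, hgv]) j)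
      have hminO : minOI ans (some (leafMin rs (bumpAt b pre.length j))) = ans := by
        subst hansa
        simp only [minOI, hLeq]
        rw [min_eq_left hale]
      simp only [dfsLoop, hv, if_pos]
      rw [ih _ vis ans hbeq' hInv, hrange, List.foldl_cons, hminO]
      rfl
    · have hfb : f (bumpAt b pre.length j) = some (leafMin rs (bumpAt b pre.length j)) :=
        Hrec _ hi
      cases hans : ans with
      | none =>
        have step : dfsLoop f j pre (v :: t) (vis, none)
            = dfsLoop f j (v :: pre) t
                (vis.add v, some (leafMin rs (bumpAt b pre.length j))) := by
          simp [dfsLoop, hv, ← hbump, hfb, minOI]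
        have hInv' : ∀ v'' ∈ vis.add v, ∃ i'', i'' < b.length ∧ b.getD i'' 0 = v'' ∧
            ∃ a, (some (leafMin rs (bumpAt b pre.length j)) : Option Int) = some a ∧
              a ≤ leafMin rs (bumpAt b i'' j) := by
          intro v'' hv''
          rw [PySem.Set.mem_add] at hv''
          rcases hv'' with hv'' | rfl
          · obtain ⟨_, _, _, a, ha, _⟩ := hInv _ hv''
            rw [hans] at ha; cases ha
          · exact ⟨pre.length, hi, hgd, _, rfl, le_refl _⟩
        rw [step, ih _ _ _ hbeq' hInv', hrange, List.foldl_cons]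
        simp [minOI]
      | some a =>
        by_cases hpr : pyMax (bumpAt b pre.length j) < a
        · have step : dfsLoop f j pre (v :: t) (vis, some a)
              = dfsLoop f j (v :: pre) t
                  (vis.add v, some (min a (leafMin rs (bumpAt b pre.length j)))) := by
            simp [dfsLoop, hv, ← hbump, hfb, minOI, hpr]
          have hInv' : ∀ v'' ∈ vis.add v, ∃ i'', i'' < b.length ∧ b.getD i'' 0 = v'' ∧
              ∃ a', (some (min a (leafMin rs (bumpAt b pre.length j))) : Option Int) = some a' ∧
                a' ≤ leafMin rs (bumpAt b i'' j) := by
            intro v'' hv''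
            rw [PySem.Set.mem_add] at hv''
            rcases hv'' with hv'' | rfl
            · obtain ⟨i'', hi'', hgv, a', ha', hle'⟩ := hInv _ hv''
              rw [hans] at ha'; cases ha'
              exact ⟨i'', hi'', hgv, _, rfl, le_trans (min_le_left _ _) hle'⟩
            · exact ⟨pre.length, hi, hgd, _, rfl, min_le_right _ _⟩
          rw [step, ih _ _ _ hbeq' hInv', hrange, List.foldl_cons]
          simp [minOI]
        · -- pruned: a ≤ max(buckets') ≤ leafMin, so the min is unchanged
          have haLi : a ≤ leafMin rs (bumpAt b pre.length j) := by
            refine le_trans (not_lt.mp hpr) (pyMax_le_leafMin rs _ Hnn ?_)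
            exact bumpAt_ne_nil hb pre.length j
          have step : dfsLoop f j pre (v :: t) (vis, some a)
              = dfsLoop f j (v :: pre) t (vis.add v, some a) := by
            simp [dfsLoop, hv, ← hbump, hpr]
          have hInv' : ∀ v'' ∈ vis.add v, ∃ i'', i'' < b.length ∧ b.getD i'' 0 = v'' ∧
              ∃ a', (some a : Option Int) = some a' ∧ a' ≤ leafMin rs (bumpAt b i'' j) := by
            intro v'' hv''
            rw [PySem.Set.mem_add] at hv''
            rcases hv'' with hv'' | rfl
            · obtain ⟨i'', hi'', hgv, a', ha', hle'⟩ := hInv _ hv''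
              rw [hans] at ha'
              exact ⟨i'', hi'', hgv, a', ha', hle'⟩
            · exact ⟨pre.length, hi, hgd, a, rfl, haLi⟩
          rw [step, ih _ _ _ hbeq' hInv', hrange, List.foldl_cons]
          simp [minOI, min_eq_left haLi]

-- HypA rest b: the condition under which A's pruned DFS from bucket state b is exact
def HypA (rest b : List Int) : Prop :=
  (∀ x ∈ rest.tail, 0 ≤ x) ∨ b.length = 1 ∨
    ((∀ x ∈ b, x = b.getD 0 0) ∧ ∀ x ∈ rest.tail.tail, 0 ≤ x)

lemma dfsLoop_skip_all (f : List Int → Option Int) (j : Int) :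
    ∀ (suf pre : List Int) (vis : PySem.Set Int) (ans : Option Int),
      (∀ v ∈ suf, v ∈ vis) → dfsLoop f j pre suf (vis, ans) = (vis, ans) := by
  intro suf
  induction suf with
  | nil => intro pre vis ans _; rfl
  | cons v t ih =>
    intro pre vis ans h
    have hv : v ∈ vis := h v (List.mem_cons_self ..)
    simp only [dfsLoop, hv, if_pos]
    exact ih _ vis ans (fun x hx => h x (List.mem_cons_of_mem _ hx))

-- one dfs level whose bucket values are all equal: only the first bucket is explored (vis dedup)
lemma dfsA_cons_allEq (j : Int) (rs b : List Int) (hlen : 1 ≤ b.length)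
    (heq : ∀ x ∈ b, x = b.getD 0 0)
    (Hrec0 : dfsA rs (bumpAt b 0 j) = some (leafMin rs (bumpAt b 0 j))) :
    dfsA (j :: rs) b = some (leafMin (j :: rs) b) := by
  have h0lt : 0 < b.length := by omega
  have hgd : ∀ i, i < b.length → b.getD i 0 = b.getD 0 0 := by
    intro i hi
    rw [getD_eq_elem hi]
    exact heq _ (List.getElem_mem hi)
  have hfin : leafMin (j :: rs) b = leafMin rs (bumpAt b 0 j) := by
    simp only [leafMin]
    apply pyMin_eq_of
    · exact List.mem_map.mpr ⟨bumpAt b 0 j, mem_bumpsL.mpr ⟨0, h0lt, rfl⟩, rfl⟩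
    · intro y hy
      obtain ⟨c, hc, rfl⟩ := List.mem_map.mp hy
      obtain ⟨i, hi, rfl⟩ := mem_bumpsL.mp hc
      exact le_of_eq (leafMin_perm rs (bumpAt_perm_of_eq h0lt hi (hgd i hi).symm j))
  rcases b with _ | ⟨bv, bt⟩
  · simp at hlen
  · have hb0 : bumpAt (bv :: bt) 0 j = (bv + j) :: bt := by simp [bumpAt]
    rw [hb0] at Hrec0
    have hv : ¬ ((bv : Int) ∈ (PySem.Set.empty : PySem.Set Int)) := by
      simp [PySem.Set.empty]
    have step : dfsLoop (fun b' => dfsA rs b') j [] (bv :: bt) (PySem.Set.empty, none)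
        = dfsLoop (fun b' => dfsA rs b') j [bv] bt
            (PySem.Set.add PySem.Set.empty bv, some (leafMin rs (bumpAt (bv :: bt) 0 j))) := by
      simp [dfsLoop, hv, Hrec0, minOI, hb0]
    have hskip : ∀ x ∈ bt, x ∈ PySem.Set.add PySem.Set.empty bv := by
      intro x hx
      rw [PySem.Set.mem_add]
      right
      simpa using heq x (List.mem_cons_of_mem _ hx)
    rw [show dfsA (j :: rs) (bv :: bt) = (dfsLoop (fun b' => dfsA rs b') j [] (bv :: bt)
      (PySem.Set.empty, none)).2 from rfl, step, dfsLoop_skip_all _ _ _ _ _ _ hskip, hfin]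

lemma dfsA_eq : ∀ (rest b : List Int), 1 ≤ b.length → HypA rest b →
    dfsA rest b = some (leafMin rest b) := by
  intro rest
  induction rest with
  | nil =>
    intro b hlen _
    have hb : b ≠ [] := by intro he; rw [he] at hlen; simp at hlen
    rcases hq : PySem.List.max? b (fun y => y) with _ | m
    · exact absurd ((PySem.List.max?_eq_none_iff _ _).mp hq) hb
    · simp [dfsA, leafMin, pyMax, hq]
  | cons j rs ih =>
    intro b hlen hyp
    have hb : b ≠ [] := by intro he; rw [he] at hlen; simp at hlen
    rcases hyp with hnn | h1 | ⟨heq, hnn2⟩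
    · -- remaining jobs after j are nonnegative: pruning is sound, use the loop invariant
      have hnn' : ∀ x ∈ rs, 0 ≤ x := by simpa using hnn
      have Hrec : ∀ i, i < b.length →
          dfsA rs (bumpAt b i j) = some (leafMin rs (bumpAt b i j)) := by
        intro i hi
        exact ih (bumpAt b i j) (by rw [length_bumpAt]; omega)
          (Or.inl (fun x hx => hnn' x (List.mem_of_mem_tail hx)))
      have hloop := dfsLoop_eq (fun b' => dfsA rs b') b j rs Hrec hnn' hb b []
        PySem.Set.empty none (by simp) (by intro v hv; simp [PySem.Set.empty] at hv)
      obtain ⟨m, hm⟩ : ∃ m, b.length = m + 1 := ⟨b.length - 1, by omega⟩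
      rw [show dfsA (j :: rs) b =
        (dfsLoop (fun b' => dfsA rs b') j [] b (PySem.Set.empty, none)).2
        from rfl, hloop]
      simp only [List.length_nil] at hloop ⊢
      rw [← List.range_eq_range']
      rw [hm, List.range_succ_eq_map, List.foldl_cons]
      rw [show minOI none (some (leafMin rs (bumpAt b 0 j)))
        = some (leafMin rs (bumpAt b 0 j)) from rfl, foldl_minOI_some]
      simp only [leafMin]
      rw [bumpsL_eq_range, hm, List.range_succ_eq_map]
      simp only [List.map_cons, List.map_map, Function.comp_def]
      rw [pyMin, PySem.List.min?_id_cons]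
      simp
    · -- k = 1: a single bucket, the loop has one iteration
      have Hrec0 : dfsA rs (bumpAt b 0 j) = some (leafMin rs (bumpAt b 0 j)) :=
        ih (bumpAt b 0 j) (by rw [length_bumpAt]; omega)
          (Or.inr (Or.inl (by rw [length_bumpAt]; exact h1)))
      have heq : ∀ x ∈ b, x = b.getD 0 0 := by
        rcases b with _ | ⟨x, t⟩
        · simp
        · have ht : t = [] := by simpa using h1
          subst ht; simp
      exact dfsA_cons_allEq j rs b hlen heq Hrec0
    · -- all buckets equal (the top-level all-zero state)
      have Hrec0 : dfsA rs (bumpAt b 0 j) = some (leafMin rs (bumpAt b 0 j)) :=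
        ih (bumpAt b 0 j) (by rw [length_bumpAt]; omega) (Or.inl hnn2)
      exact dfsA_cons_allEq j rs b hlen heq Hrec0

-- ===== B-side: counter states =====

-- the multiset of bucket loads a counter state stands for
def expandSt (st : List (Int × Int)) : List Int :=
  st.flatMap (fun p => List.replicate p.2.toNat p.1)

-- reachable-state invariant: positive counts, distinct loads
def StInv (st : List (Int × Int)) : Prop :=
  (∀ p ∈ st, 1 ≤ p.2) ∧ (st.map Prod.fst).Nodup

-- total count of load x in a counter list
def cntI (st : List (Int × Int)) (x : Int) : Int :=
  (st.map (fun p => if p.1 = x then p.2 else 0)).sum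

lemma pyMax_congr_mem {l₁ l₂ : List Int} (h1 : l₁ ≠ []) (h : ∀ x, x ∈ l₁ ↔ x ∈ l₂) :
    pyMax l₁ = pyMax l₂ := by
  have s1 := pyMax_spec h1
  have h2 : l₂ ≠ [] := List.ne_nil_of_mem ((h _).mp s1.1)
  have s2 := pyMax_spec h2
  exact le_antisymm (s2.2 _ ((h _).mp s1.1)) (s1.2 _ ((h _).mpr s2.1))

lemma count_expand (x : Int) :
    ∀ (st : List (Int × Int)), (∀ p ∈ st, 0 ≤ p.2) →
      (((expandSt st).count x : Int)) = cntI st x := by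
  intro st
  induction st with
  | nil => intro _; simp [expandSt, cntI]
  | cons p t ih =>
    intro hpos
    have hp : 0 ≤ p.2 := hpos p (List.mem_cons_self ..)
    have ih' := ih (fun q hq => hpos q (List.mem_cons_of_mem _ hq))
    have hcnt : cntI (p :: t) x = (if p.1 = x then p.2 else 0) + cntI t x := by simp [cntI]
    have hexp : expandSt (p :: t) = List.replicate p.2.toNat p.1 ++ expandSt t := by
      simp [expandSt]
    rw [hexp, hcnt, List.count_append, List.count_replicate]
    by_cases hx : p.1 = x
    · have hbeq : (p.1 == x) = true := by simp [hx]
      rw [if_pos hbeq, if_pos hx]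
      push_cast
      rw [Int.toNat_of_nonneg hp, ih']
    · have hbeq : ¬ ((p.1 == x) = true) := by simpa using hx
      rw [if_neg hbeq, if_neg hx]
      push_cast
      rw [ih']

lemma mem_expand (st : List (Int × Int)) (hpos : ∀ p ∈ st, 1 ≤ p.2) (x : Int) :
    x ∈ expandSt st ↔ x ∈ st.map Prod.fst := by
  simp only [expandSt, List.mem_flatMap, List.mem_replicate, List.mem_map]
  constructor
  · rintro ⟨p, hp, _, rfl⟩; exact ⟨p, hp, rfl⟩
  · rintro ⟨p, hp, rfl⟩
    exact ⟨p, hp, by have := hpos p hp; omega, rfl⟩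

lemma expand_ne_nil {st : List (Int × Int)} (hpos : ∀ p ∈ st, 1 ≤ p.2) (hne : st ≠ []) :
    expandSt st ≠ [] := by
  obtain ⟨p, hp⟩ := List.exists_mem_of_ne_nil st hne
  exact List.ne_nil_of_mem ((mem_expand st hpos p.1).mpr (List.mem_map.mpr ⟨p, hp, rfl⟩))

lemma bumpLoop_fst_sublist (v w : Int) :
    ∀ st : List (Int × Int), ((bumpLoop v w st).1.map Prod.fst).Sublist (st.map Prod.fst) := by
  intro st
  induction st with
  | nil => simp [bumpLoop]
  | cons p t ih =>
    simp only [bumpLoop, List.map_cons]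
    by_cases h : 0 < p.2 - (if p.1 = v then 1 else 0) + (if p.1 = w then 1 else 0)
    · simpa [h] using ih.cons₂ p.1
    · simpa [h] using ih.cons p.1

lemma bumpLoop_snd (v w : Int) :
    ∀ st : List (Int × Int), (bumpLoop v w st).2 = decide (w ∈ st.map Prod.fst) := by
  intro st
  induction st with
  | nil => simp [bumpLoop]
  | cons p t ih =>
    simp only [bumpLoop, ih, List.map_cons, List.mem_cons]
    by_cases h : p.1 = w
    · simp [h]
    · simp [h, Ne.symm h]

lemma bumpLoop_pos (v w : Int) :
    ∀ st : List (Int × Int), ∀ p ∈ (bumpLoop v w st).1, 1 ≤ p.2 := by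
  intro st
  induction st with
  | nil => simp [bumpLoop]
  | cons q t ih =>
    intro p hp
    simp only [bumpLoop, List.mem_append] at hp
    rcases hp with hp | hp
    · by_cases h : 0 < q.2 - (if q.1 = v then 1 else 0) + (if q.1 = w then 1 else 0)
      · rw [if_pos h, List.mem_singleton] at hp
        subst hp
        omega
      · rw [if_neg h] at hp
        simp at hp
    · exact ih p hp

lemma bumpLoop_cnt (v w x : Int) :
    ∀ st : List (Int × Int), (∀ p ∈ st, 1 ≤ p.2) →
      cntI (bumpLoop v w st).1 x =
        cntI st x - (if x = v then (((st.map Prod.fst).count v : Nat) : Int) else 0)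
          + (if x = w then (((st.map Prod.fst).count w : Nat) : Int) else 0) := by
  intro st
  induction st with
  | nil => intro _; simp [bumpLoop, cntI]
  | cons p t ih =>
    intro hpos
    have hp : 1 ≤ p.2 := hpos p (List.mem_cons_self ..)
    have ih' := ih (fun q hq => hpos q (List.mem_cons_of_mem _ hq))
    have hcons : cntI (p :: t) x = (if p.1 = x then p.2 else 0) + cntI t x := by simp [cntI]
    have happ : ∀ (l₁ l₂ : List (Int × Int)), cntI (l₁ ++ l₂) x = cntI l₁ x + cntI l₂ x := by
      intro l₁ l₂; simp [cntI]
    have hone : cntI [(p.1, p.2 - (if p.1 = v then 1 else 0) + (if p.1 = w then 1 else 0))] x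
        = if p.1 = x then p.2 - (if p.1 = v then 1 else 0) + (if p.1 = w then 1 else 0)
          else 0 := by
      simp [cntI]
    simp only [bumpLoop, List.map_cons, List.count_cons, beq_iff_eq]
    by_cases h : 0 < p.2 - (if p.1 = v then 1 else 0) + (if p.1 = w then 1 else 0)
    · rw [if_pos h, happ, hone, ih', hcons]
      push_cast
      split_ifs at h ⊢ <;> omega
    · rw [if_neg h, List.nil_append, ih', hcons]
      push_cast
      split_ifs at h ⊢ <;> omega

lemma count_one_of_nodup {l : List Int} {a : Int} (hn : l.Nodup) (ha : a ∈ l) :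
    l.count a = 1 := by
  have h1 : l.count a ≤ 1 := List.nodup_iff_count_le_one.mp hn a
  have h2 : 1 ≤ l.count a := List.count_pos_iff.mpr ha
  omega

lemma expand_succ_perm (st : List (Int × Int)) (hInv : StInv st) {v c : Int}
    (hvc : (v, c) ∈ st) (j : Int) :
    (expandSt (succCounter st v j)).Perm ((v + j) :: (expandSt st).erase v) := by
  obtain ⟨hpos, hnd⟩ := hInv
  have hkeys : v ∈ st.map Prod.fst := List.mem_map.mpr ⟨(v, c), hvc, rfl⟩
  have hcv : (st.map Prod.fst).count v = 1 := count_one_of_nodup hnd hkeys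
  have hvex : v ∈ expandSt st := (mem_expand st hpos v).mpr hkeys
  rw [List.perm_iff_count]
  intro x
  -- counts of the successor, via cntI
  have hsucc : (expandSt (succCounter st v j)).count x
      = (expandSt (if (bumpLoop v (v + j) st).2 then (bumpLoop v (v + j) st).1
        else (bumpLoop v (v + j) st).1 ++ [(v + j, 1)])).count x := by
    refine List.Perm.count_eq ?_ x
    exact (PySem.List.sorted2_perm _ _ _ _).flatMap (fun a _ => List.Perm.refl _)
  have hposout : ∀ p ∈ (if (bumpLoop v (v + j) st).2 then (bumpLoop v (v + j) st).1
      else (bumpLoop v (v + j) st).1 ++ [(v + j, 1)]), 1 ≤ p.2 := by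
    intro p hp
    by_cases hadd : (bumpLoop v (v + j) st).2
    · rw [if_pos hadd] at hp
      exact bumpLoop_pos v (v + j) st p hp
    · rw [if_neg hadd, List.mem_append] at hp
      rcases hp with hp | hp
      · exact bumpLoop_pos v (v + j) st p hp
      · rw [List.mem_singleton] at hp; subst hp; omega
  have hL : ((expandSt (succCounter st v j)).count x : Int)
      = cntI (if (bumpLoop v (v + j) st).2 then (bumpLoop v (v + j) st).1
        else (bumpLoop v (v + j) st).1 ++ [(v + j, 1)]) x := by
    rw [hsucc]
    exact count_expand x _ (fun p hp => le_trans (by omega) (hposout p hp))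
  have hcntapp : ∀ (l₁ l₂ : List (Int × Int)), cntI (l₁ ++ l₂) x = cntI l₁ x + cntI l₂ x := by
    intro l₁ l₂; simp [cntI]
  have hbl := bumpLoop_cnt v (v + j) x st hpos
  have hsnd := bumpLoop_snd v (v + j) st
  -- right-hand side count
  have hR : ((v + j) :: (expandSt st).erase v).count x
      = (if x = v + j then 1 else 0) + ((expandSt st).count x - if x = v then 1 else 0) := by
    rw [List.count_cons, List.count_erase]
    have hvc1 : 1 ≤ (expandSt st).count v := List.count_pos_iff.mpr hvex
    simp only [beq_iff_eq]
    split_ifs <;> omega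
  have hE := count_expand x st (fun p hp => le_trans (by omega) (hpos p hp))
  -- put everything together over ℤ
  have hwcount : ((st.map Prod.fst).count (v + j) : Int)
      = if (v + j) ∈ st.map Prod.fst then 1 else 0 := by
    by_cases hw : (v + j) ∈ st.map Prod.fst
    · simp [hw, count_one_of_nodup hnd hw]
    · simp [hw, List.count_eq_zero_of_not_mem hw]
  have hgoal : ((expandSt (succCounter st v j)).count x : Int)
      = (((v + j) :: (expandSt st).erase v).count x : Int) := by
    rw [hL, hR]
    by_cases hadd : (bumpLoop v (v + j) st).2
    · have hwmem : (v + j) ∈ st.map Prod.fst := by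
        have := hsnd; rw [hadd] at this; exact of_decide_eq_true this.symm
      rw [if_pos hadd, hbl, hcv]
      have hvc1 : 1 ≤ (expandSt st).count x ∨ x ≠ v := by
        by_cases h2 : x = v
        · subst h2; exact Or.inl (List.count_pos_iff.mpr hvex)
        · exact Or.inr h2
      push_cast
      rw [← hE]
      rw [hwcount, if_pos hwmem]
      rcases hvc1 with h | h
      · split_ifs <;> push_cast <;> omega
      · split_ifs <;> push_cast <;> omega
    · have hwmem : (v + j) ∉ st.map Prod.fst := by
        have := hsnd; rw [Bool.not_eq_true] at hadd; rw [hadd] at this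
        simpa using this.symm
      rw [if_neg hadd, hcntapp, hbl, hcv]
      have hone : cntI [(v + j, 1)] x = if x = v + j then 1 else 0 := by
        simp [cntI, eq_comm]
      rw [hone, hwcount, if_neg hwmem]
      have hvc1 : x = v → 1 ≤ (expandSt st).count x := by
        intro h2; subst h2; exact List.count_pos_iff.mpr hvex
      rw [← hE]
      by_cases h2 : x = v <;> [have := hvc1 h2; skip] <;> split_ifs <;> push_cast <;> omega
  exact_mod_cast hgoal

lemma succCounter_inv (st : List (Int × Int)) (hInv : StInv st) (v j : Int) :
    StInv (succCounter st v j) := by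
  obtain ⟨hpos, hnd⟩ := hInv
  set out := (if (bumpLoop v (v + j) st).2 then (bumpLoop v (v + j) st).1
    else (bumpLoop v (v + j) st).1 ++ [(v + j, 1)]) with hout
  have hperm : (succCounter st v j).Perm out := PySem.List.sorted2_perm _ _ _ _
  have hposout : ∀ p ∈ out, 1 ≤ p.2 := by
    intro p hp
    rw [hout] at hp
    by_cases hadd : (bumpLoop v (v + j) st).2
    · rw [if_pos hadd] at hp
      exact bumpLoop_pos v (v + j) st p hp
    · rw [if_neg hadd, List.mem_append] at hp
      rcases hp with hp | hp
      · exact bumpLoop_pos v (v + j) st p hp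
      · rw [List.mem_singleton] at hp; subst hp; omega
  have hndout : (out.map Prod.fst).Nodup := by
    have hsub := bumpLoop_fst_sublist v (v + j) st
    have hnd1 : ((bumpLoop v (v + j) st).1.map Prod.fst).Nodup := hsub.nodup hnd
    rw [hout]
    by_cases hadd : (bumpLoop v (v + j) st).2
    · rw [if_pos hadd]; exact hnd1
    · rw [if_neg hadd]
      have hwmem : (v + j) ∉ st.map Prod.fst := by
        have := bumpLoop_snd v (v + j) st
        rw [Bool.not_eq_true] at hadd; rw [hadd] at this
        simpa using this.symm
      have hw1 : (v + j) ∉ (bumpLoop v (v + j) st).1.map Prod.fst :=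
        fun hmem => hwmem (hsub.subset hmem)
      rw [List.map_append, List.nodup_append]
      refine ⟨hnd1, by simp, ?_⟩
      intro a ha1 b hb
      have hb' : b = v + j := by simpa using hb
      subst hb'
      exact fun he => hw1 (he ▸ ha1)
  constructor
  · intro p hp
    exact hposout p (hperm.mem_iff.mp hp)
  · have := hperm.map Prod.fst
    exact this.nodup_iff.mpr hndout

lemma succ_leafMin (rs : List Int) (st : List (Int × Int)) (hInv : StInv st) {v c : Int}
    (hvc : (v, c) ∈ st) {i : Nat} (hi : i < (expandSt st).length)
    (hgd : (expandSt st).getD i 0 = v) (j : Int) :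
    leafMin rs (expandSt (succCounter st v j)) = leafMin rs (bumpAt (expandSt st) i j) := by
  have h1 := expand_succ_perm st hInv hvc j
  have hvmem : v ∈ expandSt st := by
    rw [← hgd, getD_eq_elem hi]
    exact List.getElem_mem hi
  have h2 : ((expandSt st).erase v).Perm ((expandSt st).eraseIdx i) := by
    have ha := List.perm_cons_erase hvmem
    have hb2 := perm_cons_eraseIdx (expandSt st) i hi
    rw [hgd] at hb2
    exact (ha.symm.trans hb2).cons_inv
  have h3 : (bumpAt (expandSt st) i j).Perm ((v + j) :: (expandSt st).eraseIdx i) := by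
    have h := set_perm_cons_eraseIdx (expandSt st) i ((expandSt st).getD i 0 + j) hi
    rw [hgd] at h
    rw [bumpAt, hgd]
    exact h
  exact leafMin_perm rs ((h1.trans ((h2.cons _).trans h3.symm)))

lemma mem_stepB {j : Int} {S : List (List (Int × Int))} {x : List (Int × Int)} :
    x ∈ stepB j S ↔ ∃ st ∈ S, ∃ p ∈ st, x = succCounter st p.1 j := by
  have gen : ∀ (S : List (List (Int × Int))) (acc : PySem.Set (List (Int × Int))),
      x ∈ S.foldl (fun nxt st =>
          st.foldl (fun nxt2 p => PySem.Set.add nxt2 (succCounter st p.1 j)) nxt) acc ↔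
      x ∈ acc ∨ ∃ st ∈ S, ∃ p ∈ st, x = succCounter st p.1 j := by
    intro S
    induction S with
    | nil => simp
    | cons st S ih =>
      intro acc
      rw [List.foldl_cons, ih, PySem.Set.mem_foldl_add]
      simp only [List.mem_cons]
      aesop
  rw [show stepB j S = S.foldl (fun nxt st =>
      st.foldl (fun nxt2 p => PySem.Set.add nxt2 (succCounter st p.1 j)) nxt)
      PySem.Set.empty from rfl, gen]
  simp [PySem.Set.empty]

lemma B_fold : ∀ (rest : List Int) (S : List (List (Int × Int))), S ≠ [] →
    (∀ st ∈ S, StInv st ∧ st ≠ []) →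
    pyMin ((rest.foldl (fun sts j => stepB j sts) S).map (fun st => pyMax (st.map Prod.fst)))
      = pyMin (S.map (fun st => leafMin rest (expandSt st))) := by
  intro rest
  induction rest with
  | nil =>
    intro S _ hinv
    simp only [List.foldl_nil]
    congr 1
    refine List.map_congr_left (fun st hst => ?_)
    simp only [leafMin]
    refine pyMax_congr_mem ?_ (fun x => ?_)
    · obtain ⟨p, hp⟩ := List.exists_mem_of_ne_nil st (hinv st hst).2
      exact List.ne_nil_of_mem (List.mem_map.mpr ⟨p, hp, rfl⟩)
    · exact (mem_expand st (hinv st hst).1.1 x).symm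
  | cons j rs ih =>
    intro S hS hinv
    rw [List.foldl_cons]
    have hinv' : ∀ st ∈ stepB j S, StInv st ∧ st ≠ [] := by
      intro x hx
      obtain ⟨st, hst, p, hp, rfl⟩ := mem_stepB.mp hx
      have hI := (hinv st hst).1
      have hvc : (p.1, p.2) ∈ st := by simpa using hp
      refine ⟨succCounter_inv st hI p.1 j, ?_⟩
      intro he
      have hperm := expand_succ_perm st hI hvc j
      rw [he] at hperm
      have := hperm.length_eq
      simp [expandSt] at this
    have hS'ne : stepB j S ≠ [] := by
      obtain ⟨st0, hst0⟩ := List.exists_mem_of_ne_nil S hS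
      obtain ⟨p0, hp0⟩ := List.exists_mem_of_ne_nil st0 (hinv st0 hst0).2
      exact List.ne_nil_of_mem (mem_stepB.mpr ⟨st0, hst0, p0, hp0, rfl⟩)
    rw [ih _ hS'ne hinv']
    have hbne : ∀ st ∈ S, expandSt st ≠ [] :=
      fun st hst => expand_ne_nil (hinv st hst).1.1 (hinv st hst).2
    have hSm : S.map (fun st => leafMin (j :: rs) (expandSt st)) ≠ [] := by simpa using hS
    obtain ⟨hmem_m, hlb_m⟩ := pyMin_spec hSm
    obtain ⟨bs, hbs, hbeq⟩ := List.mem_map.mp hmem_m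
    apply pyMin_eq_of
    · rw [← hbeq]
      have hEne : (bumpsL j (expandSt bs)).map (fun c => leafMin rs c) ≠ [] := by
        simp [bumpsL_ne_nil (hbne _ hbs) j]
      simp only [leafMin]
      obtain ⟨hm2, _⟩ := pyMin_spec hEne
      obtain ⟨cs, hcs, hceq⟩ := List.mem_map.mp hm2
      obtain ⟨is, his, rfl⟩ := mem_bumpsL.mp hcs
      rw [← hceq]
      have hvmem : (expandSt bs).getD is 0 ∈ expandSt bs := by
        rw [getD_eq_elem his]
        exact List.getElem_mem his
      have hkey : (expandSt bs).getD is 0 ∈ bs.map Prod.fst :=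
        (mem_expand bs (hinv bs hbs).1.1 _).mp hvmem
      obtain ⟨p, hp, hpv⟩ := List.mem_map.mp hkey
      refine List.mem_map.mpr ⟨succCounter bs p.1 j,
        mem_stepB.mpr ⟨bs, hbs, p, hp, rfl⟩, ?_⟩
      have hvc : (p.1, p.2) ∈ bs := by simpa using hp
      exact succ_leafMin rs bs (hinv bs hbs).1 hvc his hpv.symm j
    · intro y hy
      obtain ⟨c0, hc0, rfl⟩ := List.mem_map.mp hy
      obtain ⟨st, hst, p, hp, rfl⟩ := mem_stepB.mp hc0
      have hvc : (p.1, p.2) ∈ st := by simpa using hp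
      have hkey : p.1 ∈ st.map Prod.fst := List.mem_map.mpr ⟨p, hp, rfl⟩
      have hvmem : p.1 ∈ expandSt st := (mem_expand st (hinv st hst).1.1 _).mpr hkey
      obtain ⟨i, hi, hig⟩ := List.mem_iff_getElem.mp hvmem
      have hgd : (expandSt st).getD i 0 = p.1 := by rw [getD_eq_elem hi, hig]
      rw [succ_leafMin rs st (hinv st hst).1 hvc hi hgd j]
      have h2 : leafMin (j :: rs) (expandSt st) ≤ leafMin rs (bumpAt (expandSt st) i j) := by
        simp only [leafMin]
        exact (pyMin_spec (by simp [bumpsL_ne_nil (hbne st hst) j])).2 _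
          (List.mem_map.mpr ⟨bumpAt (expandSt st) i j, mem_bumpsL.mpr ⟨i, hi, rfl⟩, rfl⟩)
      exact le_trans (hlb_m _ (List.mem_map.mpr ⟨st, hst, rfl⟩)) h2

lemma final_eq (js : List Int) (k : Int) (hk1 : 1 ≤ k)
    (hHyp : HypA js (List.replicate k.toNat (0 : Int))) :
    (dfsA js (List.replicate k.toNat (0 : Int))).getD 0 =
      (PySem.List.min? ((js.foldl (fun sts j => stepB j sts) [[((0 : Int), k)]]).map
        (fun st => pyMax (st.map Prod.fst))) (fun y => y)).getD 0 := by
  have hkn : 1 ≤ k.toNat := by omega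
  have hexp : expandSt [((0 : Int), k)] = List.replicate k.toNat 0 := by simp [expandSt]
  have hA := dfsA_eq js (List.replicate k.toNat (0 : Int)) (by rw [List.length_replicate]; omega) hHyp
  have hB := B_fold js [[((0 : Int), k)]] (by simp)
    (by intro st hst
        rw [List.mem_singleton] at hst
        subst hst
        refine ⟨⟨?_, by simp⟩, by simp⟩
        intro p hp
        rw [List.mem_singleton] at hp
        subst hp
        exact hk1)
  rw [hA]
  show (some (leafMin js (List.replicate k.toNat 0))).getD 0
      = pyMin ((js.foldl (fun sts j => stepB j sts) [[((0 : Int), k)]]).map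
          (fun st => pyMax (st.map Prod.fst)))
  rw [hB]
  simp [pyMin, hexp, PySem.List.min?_id_cons]

-- ===== VERDICT (by name: the statement is the Claim_ definition above) =====
theorem minimumTimeRequired_spec : Claim_equal_minimumTimeRequired := by
  unfold Claim_equal_minimumTimeRequired
  intro jobs k hDom hPre
  obtain ⟨hk1, hcase⟩ := hPre
  have hHyp : HypA (PySem.List.sorted jobs (fun y => y) true)
      (List.replicate k.toNat (0 : Int)) := by
    rcases hcase with hk | hlen | hall
    · right; left
      simp only [List.length_replicate]
      omega
    · right; right
      constructor
      · intro x hx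
        obtain ⟨m, hm⟩ : ∃ m, k.toNat = m + 1 := ⟨k.toNat - 1, by omega⟩
        rw [List.eq_of_mem_replicate hx, hm]
        simp [List.replicate_succ]
      · have hnil : (PySem.List.sorted jobs (fun y => y) true).tail.tail = [] := by
          apply List.eq_nil_of_length_eq_zero
          have hjl : (PySem.List.sorted jobs (fun y => y) true).length ≤ 2 := by
            rw [PySem.List.length_sorted]; omega
          simp only [List.length_tail]
          omega
        rw [hnil]
        intro x hx
        simp at hx
    · exact Or.inl (fun x hx =>
        hall x ((PySem.List.mem_sorted _ _ _ _).mp (List.mem_of_mem_tail hx)))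
  exact final_eq (PySem.List.sorted jobs (fun y => y) true) k hk1 hHyp
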